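-- pv_equiv track=rewrite | github.com/k0tayan/SupportM4pleOnSonolus | api/index.py | convertM4pleSUS
-- ===== SOURCE A (Python) =====
-- def convertM4pleSUS(input_sus):
--     sus = input_sus
--     START_SYMBOL = 'BPM\n'
--     header = sus[:sus.find(START_SYMBOL)]
--     start_index = sus.find(START_SYMBOL) + len(START_SYMBOL)
--
--     measures = sus[start_index:].replace(' ', '').split('\n')
--     measures = list(filter(lambda x: len(x) > 1 and x[0] == '#', measures))
--
--     bpm_list = list(filter(lambda x: x[:4] == '#BPM', measures))
--     for i in range(len(bpm_list)):
--         bpm_index = bpm_list[i][4:6]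
--         bpm = bpm_list[i].split(':')[1]
--         new_bpm_index = str(int(bpm_index) - 1).zfill(2)
--         bpm_list[i] = f"#BPM{new_bpm_index}: {bpm}"
--
--     ref_bpm_list = list(filter(lambda x: x[4:6] == '08', measures))
--     for i in range(len(ref_bpm_list)):
--         measure, bpm_index = ref_bpm_list[i].split(':')
--         new_bpm_index = str(int(bpm_index) - 1).zfill(2)
--         ref_bpm_list[i] = f"{measure}: {new_bpm_index}"
--
--     pulses = list(filter(lambda x: x[:4] != '#BPM' and x[4:6] == '02', measures))
--
--     tap_notes = list(filter(lambda x: x[4] == '1', measures))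
--
--     directinal_notes = list(filter(lambda x: x[4] == '5', measures))
--
--     slide_notes = list(filter(lambda x: x[4] == '3', measures))
--     for i in range(len(slide_notes)):
--         slide_note = list(slide_notes[i])
--
--         if ord(slide_note[6].upper()) < ord('A'):
--             raise Exception('Unspported SUS.')
--         slide_note[6] = str(ord(slide_note[6].upper()) - ord('A'))
--         slide_notes[i] = ''.join(slide_note)
--
--     controls = pulses + bpm_list + ref_bpm_list
--     notes = tap_notes + directinal_notes + slide_notes
--
--     output_sus = ""
--     output_sus += header
--     for control in controls:
--         output_sus += control + '\n'
--     output_sus += "\n#TIL00: \"\"\n"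
--     output_sus += "#HISPEED 00\n"
--     output_sus += "#MEASUREHS 00\n\n"
--     for note in notes:
--         output_sus += note + '\n'
--     return output_sus
-- ===== SOURCE B (Python) =====
-- def _conv_bpm(line):
--     return f"#BPM{str(int(line[4:6]) - 1).zfill(2)}: {line.split(':')[1]}"
--
--
-- def _conv_ref(line):
--     measure, bpm_index = line.split(':')
--     return f"{measure}: {str(int(bpm_index) - 1).zfill(2)}"
--
--
-- def _conv_slide(line):
--     if ord(line[6].upper()) < ord('A'):
--         raise Exception('Unspported SUS.')
--     return line[:6] + str(ord(line[6].upper()) - ord('A')) + line[7:]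
--
--
-- def convertM4pleSUS(input_sus):
--     cut = input_sus.find('BPM\n')
--     header = input_sus[:cut]
--     body = input_sus[cut + 4:].replace(' ', '')
--
--     pulses, bpm_list, ref_bpm_list = [], [], []
--     tap_notes, directional_notes, slide_notes = [], [], []
--     for line in body.split('\n'):
--         if len(line) <= 1 or line[0] != '#':
--             continue
--         is_bpm = line[:4] == '#BPM'
--         if is_bpm:
--             bpm_list.append(_conv_bpm(line))
--         if line[4:6] == '08':
--             ref_bpm_list.append(_conv_ref(line))
--         if not is_bpm and line[4:6] == '02':
--             pulses.append(line)
--         if line[4] == '1':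
--             tap_notes.append(line)
--         elif line[4] == '5':
--             directional_notes.append(line)
--         elif line[4] == '3':
--             slide_notes.append(_conv_slide(line))
--
--     out = [header]
--     for control in pulses + bpm_list + ref_bpm_list:
--         out.append(control + '\n')
--     out.append("\n#TIL00: \"\"\n#HISPEED 00\n#MEASUREHS 00\n\n")
--     for note in tap_notes + directional_notes + slide_notes:
--         out.append(note + '\n')
--     return ''.join(out)
-- ===== Notes on version B (the rewrite author's own statement) =====
-- stated objective: simpler
-- what changed: Replaces A's six independent filter passes (plus three separate rewrite loops) over the measures list by a single loop that classifies each line once with an if/elif chain, applying the BPM-index decrement, the 08 ref-bpm decrement and the slide letter-to-offset conversion inline as each line is appended; the header extraction and output formatting are unchanged.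
import Mathlib
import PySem

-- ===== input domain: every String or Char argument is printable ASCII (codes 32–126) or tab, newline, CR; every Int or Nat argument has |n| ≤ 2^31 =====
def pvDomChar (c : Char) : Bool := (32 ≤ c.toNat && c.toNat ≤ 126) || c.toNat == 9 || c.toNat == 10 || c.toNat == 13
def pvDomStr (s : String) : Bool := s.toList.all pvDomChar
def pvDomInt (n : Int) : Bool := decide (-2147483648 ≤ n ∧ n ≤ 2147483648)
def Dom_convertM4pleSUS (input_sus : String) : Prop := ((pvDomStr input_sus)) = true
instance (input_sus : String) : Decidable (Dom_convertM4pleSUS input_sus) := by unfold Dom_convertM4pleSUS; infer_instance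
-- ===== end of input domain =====

-- B replaces A's six separate filter passes by one classifying loop over the lines; same output format (objective: simpler).

-- ===== PORT A =====
-- shared per-line conversions (the bodies of A's three rewrite loops = Source B's helpers; literal transliterations)
def pvConvBpm (x : List Char) : List Char :=
  let bpm_index := PySem.Chars.slice x (some 4) (some 6)
  let bpm := (PySem.Chars.splitOn x [':'])[1]?.getD []          -- split(':')[1]; IndexError outside Pre_
  let new_bpm_index := PySem.Chars.zfill (PySem.Int.toChars ((PySem.Int.ofChars? bpm_index).getD 0 - 1)) 2
  ['#','B','P','M'] ++ new_bpm_index ++ [':',' '] ++ bpm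

def pvConvRef (x : List Char) : List Char :=
  let parts := PySem.Chars.splitOn x [':']
  let measure := parts[0]?.getD []
  let bpm_index := parts[1]?.getD []                            -- 2-unpack; ValueError outside Pre_
  measure ++ [':',' '] ++ PySem.Chars.zfill (PySem.Int.toChars ((PySem.Int.ofChars? bpm_index).getD 0 - 1)) 2

def pvConvSlide (x : List Char) : List Char :=
  let c := PySem.Chars.upperChar ((PySem.List.pyGet? x 6).getD ' ')  -- x[6]; IndexError / 'Unspported SUS.' raise outside Pre_
  PySem.Chars.slice x none (some 6) ++ PySem.Int.toChars ((c.toNat : Int) - 65) ++ PySem.Chars.slice x (some 7) none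

-- Everything runs on List Char via PySem.Chars (exact).  Where Python raises (IndexError on short
-- lines, int() ValueError, the explicit slide raise) the port uses a .getD default — exactly those
-- inputs are excluded by Pre_ below.  A's list(line)[6] := str(..) ; ''.join edit is ported as the
-- equal value line[:6] ++ str(..) ++ line[7:].
def convertM4pleSUS (input_sus : String) : String :=
  let sus := input_sus.toList
  let f := PySem.Chars.find sus ['B','P','M','\n']
  let header := PySem.Chars.slice sus none (some f)
  let start_index := f + 4
  let measures0 := PySem.Chars.splitOn (PySem.Chars.replace (PySem.Chars.slice sus (some start_index) none) [' '] []) ['\n']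
  let measures := measures0.filter (fun x => decide (1 < x.length) && (PySem.List.pyGet? x 0 == some '#'))
  let bpm_list := (measures.filter (fun x => PySem.Chars.slice x none (some 4) == ['#','B','P','M'])).map pvConvBpm
  let ref_bpm_list := (measures.filter (fun x => PySem.Chars.slice x (some 4) (some 6) == ['0','8'])).map pvConvRef
  let pulses := measures.filter (fun x => !(PySem.Chars.slice x none (some 4) == ['#','B','P','M']) && (PySem.Chars.slice x (some 4) (some 6) == ['0','2']))
  let tap_notes := measures.filter (fun x => PySem.List.pyGet? x 4 == some '1')
  let directinal_notes := measures.filter (fun x => PySem.List.pyGet? x 4 == some '5')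
  let slide_notes := (measures.filter (fun x => PySem.List.pyGet? x 4 == some '3')).map pvConvSlide
  let controls := pulses ++ bpm_list ++ ref_bpm_list
  let notes := tap_notes ++ directinal_notes ++ slide_notes
  let output := header
  let output := controls.foldl (fun acc c => acc ++ c ++ ['\n']) output
  let output := output ++ "\n#TIL00: \"\"\n".toList
  let output := output ++ "#HISPEED 00\n".toList
  let output := output ++ "#MEASUREHS 00\n\n".toList
  let output := notes.foldl (fun acc c => acc ++ c ++ ['\n']) output
  String.ofList output

-- ===== PORT B =====
-- Source B's helpers are the shared pvConvBpm/pvConvRef/pvConvSlide above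
-- the body of Source B's single classifying loop ('continue' ported as the positive guard)
def pvStep (acc : List (List Char) × List (List Char) × List (List Char) × List (List Char) × List (List Char) × List (List Char))
    (line : List Char) :
    List (List Char) × List (List Char) × List (List Char) × List (List Char) × List (List Char) × List (List Char) :=
  match acc with
  | (pu, bp, rb, ta, di, sl) =>
    if decide (1 < line.length) && (PySem.List.pyGet? line 0 == some '#') then
      let is_bpm := PySem.Chars.slice line none (some 4) == ['#','B','P','M']
      let bp := if is_bpm then bp ++ [pvConvBpm line] else bp
      let rb := if PySem.Chars.slice line (some 4) (some 6) == ['0','8'] then rb ++ [pvConvRef line] else rb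
      let pu := if !is_bpm && (PySem.Chars.slice line (some 4) (some 6) == ['0','2']) then pu ++ [line] else pu
      if PySem.List.pyGet? line 4 == some '1' then (pu, bp, rb, ta ++ [line], di, sl)
      else if PySem.List.pyGet? line 4 == some '5' then (pu, bp, rb, ta, di ++ [line], sl)
      else if PySem.List.pyGet? line 4 == some '3' then (pu, bp, rb, ta, di, sl ++ [pvConvSlide line])
      else (pu, bp, rb, ta, di, sl)
    else (pu, bp, rb, ta, di, sl)

def convertM4pleSUS_alt (input_sus : String) : String :=
  let sus := input_sus.toList
  let cut := PySem.Chars.find sus ['B','P','M','\n']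
  let header := PySem.Chars.slice sus none (some cut)
  let body := PySem.Chars.replace (PySem.Chars.slice sus (some (cut + 4)) none) [' '] []
  match (PySem.Chars.splitOn body ['\n']).foldl pvStep ([], [], [], [], [], []) with
  | (pu, bp, rb, ta, di, sl) =>
    let out := (pu ++ bp ++ rb).foldl (fun a c => a ++ c ++ ['\n']) header
    let out := out ++ "\n#TIL00: \"\"\n#HISPEED 00\n#MEASUREHS 00\n\n".toList
    let out := (ta ++ di ++ sl).foldl (fun a c => a ++ c ++ ['\n']) out
    String.ofList out

-- ===== PRECONDITION & SPEC =====
-- pvMeasures extracts (only) the chart lines A reads: the part after 'BPM\n', spaces removed,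
-- split at newlines, keeping the '#'-lines of length > 1.  It computes no output of either program.
def pvMeasures (input_sus : String) : List (List Char) :=
  let sus := input_sus.toList
  let f := PySem.Chars.find sus ['B','P','M','\n']
  (PySem.Chars.splitOn (PySem.Chars.replace (PySem.Chars.slice sus (some (f + 4)) none) [' '] []) ['\n']).filter
    (fun x => decide (1 < x.length) && (PySem.List.pyGet? x 0 == some '#'))

-- per-line shape condition: exactly the lines on which Python A raises no exception
def pvLinePre (x : List Char) : Bool :=
  decide (5 ≤ x.length) &&
  (!(PySem.Chars.slice x none (some 4) == ['#','B','P','M']) ||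
    (decide (2 ≤ (PySem.Chars.splitOn x [':']).length) &&
      (PySem.Int.ofChars? (PySem.Chars.slice x (some 4) (some 6))).isSome)) &&
  (!(PySem.Chars.slice x (some 4) (some 6) == ['0','8']) ||
    (((PySem.Chars.splitOn x [':']).length == 2) &&
      (PySem.Int.ofChars? ((PySem.Chars.splitOn x [':'])[1]?.getD [])).isSome)) &&
  (!(PySem.List.pyGet? x 4 == some '3') ||
    (decide (7 ≤ x.length) && decide (65 ≤ (PySem.Chars.upperChar ((PySem.List.pyGet? x 6).getD ' ')).toNat)))

-- Pre_ excludes exactly the inputs on which Python A raises: a measure line shorter than 5 chars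
-- (IndexError in the note filters), a '#BPM' line without ':' or with a non-integer index
-- (IndexError / ValueError), an '08' line not splitting in exactly two integer-tailed parts
-- (ValueError), and a slide line shorter than 7 chars or whose 7th char uppercases below 'A'
-- (IndexError / the explicit raise).
def Pre_convertM4pleSUS (input_sus : String) : Prop := (pvMeasures input_sus).all pvLinePre = true
instance (input_sus : String) : Decidable (Pre_convertM4pleSUS input_sus) := by unfold Pre_convertM4pleSUS; infer_instance

def pvWitness_convertM4pleSUS : String := "head\nBPM\n#BPM01:120\n#00008:1\n#00102:23\n#00110:12\n#00530A:12\n"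

def Spec_convertM4pleSUS (input_sus : String) (out : String) : Prop := out = convertM4pleSUS_alt input_sus
instance (input_sus : String) (out : String) : Decidable (Spec_convertM4pleSUS input_sus out) := by unfold Spec_convertM4pleSUS; infer_instance

-- ===== CLAIM (what is proved, stated in full; the proofs are below) =====
def Claim_equal_convertM4pleSUS : Prop := ∀ (input_sus : String), Dom_convertM4pleSUS input_sus → Pre_convertM4pleSUS input_sus → Spec_convertM4pleSUS input_sus (convertM4pleSUS input_sus)

-- ===== LEMMAS AND PROOFS =====

-- named forms of the six filter predicates (proof-side only; each is definitionally the lambda in the ports)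
def pvOk (x : List Char) : Bool := decide (1 < x.length) && (PySem.List.pyGet? x 0 == some '#')
def pvIsBpm (x : List Char) : Bool := PySem.Chars.slice x none (some 4) == ['#','B','P','M']
def pvIsRef (x : List Char) : Bool := PySem.Chars.slice x (some 4) (some 6) == ['0','8']
def pvIsPulse (x : List Char) : Bool := !pvIsBpm x && (PySem.Chars.slice x (some 4) (some 6) == ['0','2'])
def pvIsTap (x : List Char) : Bool := PySem.List.pyGet? x 4 == some '1'
def pvIsDir (x : List Char) : Bool := PySem.List.pyGet? x 4 == some '5'
def pvIsSlide (x : List Char) : Bool := PySem.List.pyGet? x 4 == some '3'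

-- folding lemmas: rewrite the ports' inline conditions into the named predicates (all rfl)
theorem pvOk_fold (x : List Char) : (decide (1 < x.length) && (PySem.List.pyGet? x 0 == some '#')) = pvOk x := rfl
theorem pvIsBpm_fold (x : List Char) : (PySem.Chars.slice x none (some 4) == ['#','B','P','M']) = pvIsBpm x := rfl
theorem pvIsRef_fold (x : List Char) : (PySem.Chars.slice x (some 4) (some 6) == ['0','8']) = pvIsRef x := rfl
theorem pvIsPulse_fold (x : List Char) : (!pvIsBpm x && (PySem.Chars.slice x (some 4) (some 6) == ['0','2'])) = pvIsPulse x := rfl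
theorem pvIsTap_fold (x : List Char) : (PySem.List.pyGet? x 4 == some '1') = pvIsTap x := rfl
theorem pvIsDir_fold (x : List Char) : (PySem.List.pyGet? x 4 == some '5') = pvIsDir x := rfl
theorem pvIsSlide_fold (x : List Char) : (PySem.List.pyGet? x 4 == some '3') = pvIsSlide x := rfl

-- one step of B's loop, written with the named predicates
theorem pvStep_eq (pu bp rb ta di sl : List (List Char)) (x : List Char) :
    pvStep (pu, bp, rb, ta, di, sl) x =
      (pu ++ (if pvOk x && pvIsPulse x then [x] else []),
       bp ++ (if pvOk x && pvIsBpm x then [pvConvBpm x] else []),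
       rb ++ (if pvOk x && pvIsRef x then [pvConvRef x] else []),
       ta ++ (if pvOk x && pvIsTap x then [x] else []),
       di ++ (if pvOk x && pvIsDir x then [x] else []),
       sl ++ (if pvOk x && pvIsSlide x then [pvConvSlide x] else [])) := by
  simp only [pvStep, pvOk_fold, pvIsBpm_fold, pvIsRef_fold, pvIsPulse_fold, pvIsTap_fold,
    pvIsDir_fold, pvIsSlide_fold]
  cases hok : pvOk x
  · simp
  · simp only [Bool.true_and, if_true]
    split_ifs <;> simp_all [pvIsTap, pvIsDir, pvIsSlide]

-- B's whole loop = A's six filter/map passes, by induction on the lines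
theorem pvFoldl (l : List (List Char)) (pu bp rb ta di sl : List (List Char)) :
    l.foldl pvStep (pu, bp, rb, ta, di, sl) =
      (pu ++ (l.filter pvOk).filter pvIsPulse,
       bp ++ ((l.filter pvOk).filter pvIsBpm).map pvConvBpm,
       rb ++ ((l.filter pvOk).filter pvIsRef).map pvConvRef,
       ta ++ (l.filter pvOk).filter pvIsTap,
       di ++ (l.filter pvOk).filter pvIsDir,
       sl ++ ((l.filter pvOk).filter pvIsSlide).map pvConvSlide) := by
  induction l generalizing pu bp rb ta di sl with
  | nil => simp
  | cons x l ih =>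
    rw [List.foldl_cons, pvStep_eq, ih]
    by_cases hok : pvOk x = true <;>
      simp only [List.filter_cons, hok, Bool.true_and, Bool.false_and, if_true] <;>
      split_ifs <;> simp_all [List.append_assoc]

-- the three middle literals of A concatenate to B's single literal
theorem pvMid (out : List Char) :
    ((out ++ "\n#TIL00: \"\"\n".toList) ++ "#HISPEED 00\n".toList) ++ "#MEASUREHS 00\n\n".toList
      = out ++ "\n#TIL00: \"\"\n#HISPEED 00\n#MEASUREHS 00\n\n".toList := by
  simp

-- ===== VERDICT (by name: the statement is the Claim_ definition above) =====
theorem convertM4pleSUS_spec : Claim_equal_convertM4pleSUS := by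
  intro s _ _
  unfold Spec_convertM4pleSUS
  simp only [convertM4pleSUS, convertM4pleSUS_alt, pvOk_fold, pvIsBpm_fold, pvIsRef_fold,
    pvIsPulse_fold, pvIsTap_fold, pvIsDir_fold, pvIsSlide_fold, pvFoldl, List.nil_append]
  rw [pvMid]
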